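-- pv_equiv track=rewrite | github.com/jingzhing/DSA4266 | swin/scripts/stage1/clean_dataset_quality.py | _choose_duplicate_keep
-- ===== SOURCE A (Python) =====
-- from typing import Dict, List, Tuple
--
-- def _split_from_relpath(relpath: str) -> str:
--     parts = relpath.lower().split("/")
--     if "test" in parts:
--         return "test"
--     if "train" in parts:
--         return "train"
--     if "val" in parts:
--         return "val"
--     return "unknown"
--
-- def _choose_duplicate_keep(files: List[str]) -> Tuple[str, List[str], str]:
--     """
--     Deterministic duplicate policy:
--     1) If duplicate spans test + train, keep test (protect evaluation integrity).
--     2) Otherwise keep lexicographically first path.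
--     """
--     ordered = sorted(files)
--     test_files = [f for f in ordered if _split_from_relpath(f) == "test"]
--     train_files = [f for f in ordered if _split_from_relpath(f) == "train"]
--
--     if test_files and train_files:
--         keep = test_files[0]
--         reason = "cross_split_keep_test_drop_train"
--     else:
--         keep = ordered[0]
--         reason = "same_split_keep_lexicographic_first"
--     remove = [f for f in ordered if f != keep]
--     return keep, remove, reason
-- ===== SOURCE B (Python) =====
-- from typing import List, Tuple
--
-- def _split_from_relpath(relpath: str) -> str:
--     parts = relpath.lower().split("/")
--     if "test" in parts:
--         return "test"
--     if "train" in parts: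
--         return "train"
--     if "val" in parts:
--         return "val"
--     return "unknown"
--
-- def _choose_duplicate_keep(files: List[str]) -> Tuple[str, List[str], str]:
--     # No full-list sort up front: one unsorted reduction pass finds the
--     # lexicographic minimum of the test files and whether a train file exists;
--     # only the removal list is sorted at the end.
--     min_test = None
--     has_train = False
--     for f in files:
--         s = _split_from_relpath(f)
--         if s == "test" and (min_test is None or f < min_test):
--             min_test = f
--         has_train = has_train or s == "train"
--     if min_test is not None and has_train:
--         keep, reason = min_test, "cross_split_keep_test_drop_train"
--     else:
--         keep, reason = min(files), "same_split_keep_lexicographic_first"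
--     return keep, sorted(f for f in files if f != keep), reason
-- ===== Notes on version B (the rewrite author's own statement) =====
-- stated objective: alternative
-- what changed: B never sorts the full list: one unsorted reduction pass finds the lexicographic minimum of the test files and a has-train flag, min() supplies the fallback keep, and only the removal list is sorted; A instead sorts everything up front and runs three filter comprehensions over the sorted list.
-- outside the precondition, e.g. on _choose_duplicate_keep([]): A raises IndexError, B raises ValueError
import Mathlib
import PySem

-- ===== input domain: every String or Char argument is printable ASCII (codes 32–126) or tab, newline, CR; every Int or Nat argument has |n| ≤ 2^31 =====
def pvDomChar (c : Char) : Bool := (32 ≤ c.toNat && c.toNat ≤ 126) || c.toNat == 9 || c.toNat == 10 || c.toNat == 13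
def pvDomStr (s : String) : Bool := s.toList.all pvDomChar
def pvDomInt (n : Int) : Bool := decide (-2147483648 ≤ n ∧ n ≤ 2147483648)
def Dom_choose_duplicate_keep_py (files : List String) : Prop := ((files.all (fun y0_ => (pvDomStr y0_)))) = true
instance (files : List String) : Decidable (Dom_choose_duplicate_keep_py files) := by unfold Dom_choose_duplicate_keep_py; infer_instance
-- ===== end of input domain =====

-- B drops A's up-front sort of the whole list: one unsorted reduction pass finds the minimum test
-- file and a has-train flag, min() picks the fallback keep, and only the removal list is sorted;
-- objective: alternative (same asymptotic cost, a different algorithm).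

-- shared module helper _split_from_relpath (used verbatim by both Pythons)
def split_from_relpath (relpath : String) : String :=
  let parts := (PySem.Str.split? (PySem.Str.lower relpath) "/").getD []   -- sep "/" ≠ "", so split? is always some
  if "test" ∈ parts then "test"
  else if "train" ∈ parts then "train"
  else if "val" ∈ parts then "val"
  else "unknown"

-- ===== PORT A =====
def choose_duplicate_keep_py (files : List String) : String × List String × String :=
  let ordered := PySem.List.sorted files (fun x => x) false
  let test_files := ordered.filter (fun f => split_from_relpath f == "test")
  let train_files := ordered.filter (fun f => split_from_relpath f == "train")
  let keepReason : Option (String × String) :=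
    if !test_files.isEmpty && !train_files.isEmpty then
      (PySem.List.pyGet? test_files 0).map (fun k => (k, "cross_split_keep_test_drop_train"))
    else
      (PySem.List.pyGet? ordered 0).map (fun k => (k, "same_split_keep_lexicographic_first"))
  match keepReason with
  | none => ("", [], "")   -- IndexError in Python: excluded by Pre_
  | some (keep, reason) => (keep, ordered.filter (fun f => f != keep), reason)

-- ===== PORT B =====
def choose_duplicate_keep_py_alt (files : List String) : String × List String × String :=
  let st := files.foldl
    (fun (st : Option String × Bool) f =>
      let s := split_from_relpath f
      ((if (s == "test") && (match st.1 with | none => true | some m => decide (f < m))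
          then some f else st.1),
       st.2 || (s == "train")))
    (none, false)
  let keepReason : Option (String × String) :=
    match st with
    | (some t, true) => some (t, "cross_split_keep_test_drop_train")
    | _ => (PySem.List.min? files (fun x => x)).map (fun k => (k, "same_split_keep_lexicographic_first"))
  match keepReason with
  | none => ("", [], "")   -- ValueError from min() in Python: excluded by Pre_
  | some (keep, reason) =>
      (keep, PySem.List.sorted (files.filter (fun f => f != keep)) (fun x => x) false, reason)

-- ===== PRECONDITION & SPEC =====
-- Pre_ excludes only the empty list, on which both Pythons raise (A: IndexError, B: ValueError).
def Pre_choose_duplicate_keep_py (files : List String) : Prop := files ≠ []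
instance (files : List String) : Decidable (Pre_choose_duplicate_keep_py files) := by unfold Pre_choose_duplicate_keep_py; infer_instance
def pvWitness_choose_duplicate_keep_py : List String := ["train/a.wav", "test/a.wav"]
def Spec_choose_duplicate_keep_py (files : List String) (out : String × List String × String) : Prop := out = choose_duplicate_keep_py_alt files
instance (files : List String) (out : String × List String × String) : Decidable (Spec_choose_duplicate_keep_py files out) := by unfold Spec_choose_duplicate_keep_py; infer_instance

-- ===== CLAIM (what is proved, stated in full; the proofs are below) =====
def Claim_equal_choose_duplicate_keep_py : Prop := ∀ (files : List String), Dom_choose_duplicate_keep_py files → Pre_choose_duplicate_keep_py files → Spec_choose_duplicate_keep_py files (choose_duplicate_keep_py files)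

-- ===== LEMMAS AND PROOFS =====

-- running minimum, as B's loop maintains it for the test files
def runMin : Option String → List String → Option String
  | o, [] => o
  | none, x :: t => runMin (some x) t
  | some m, x :: t => runMin (some (if x < m then x else m)) t

-- B's fold = (running minimum of the test files, whether any train file exists)
lemma fold_eq (l : List String) (o : Option String) (b : Bool) :
    l.foldl
      (fun (st : Option String × Bool) f =>
        let s := split_from_relpath f
        ((if (s == "test") && (match st.1 with | none => true | some m => decide (f < m))
            then some f else st.1),
         st.2 || (s == "train")))
      (o, b)
    = (runMin o (l.filter (fun f => split_from_relpath f == "test")),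
       b || !(l.filter (fun f => split_from_relpath f == "train")).isEmpty) := by
  induction l generalizing o b with
  | nil => simp [runMin]
  | cons f t ih =>
    rw [List.foldl_cons, ih]
    simp only [List.filter_cons]
    by_cases hT : (split_from_relpath f == "test") = true <;>
      by_cases hTr : (split_from_relpath f == "train") = true <;>
      cases o <;>
      simp [hT, hTr, runMin, apply_ite some]

-- the running minimum from a seed is a least element of seed :: list
lemma runMin_some (xs : List String) (m0 : String) :
    ∃ m, runMin (some m0) xs = some m ∧ m ∈ m0 :: xs ∧ ∀ y ∈ m0 :: xs, m ≤ y := by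
  induction xs generalizing m0 with
  | nil => exact ⟨m0, rfl, by simp, by simp⟩
  | cons x t ih =>
    obtain ⟨m, h1, h2, h3⟩ := ih (if x < m0 then x else m0)
    refine ⟨m, h1, ?_, ?_⟩
    · rcases List.mem_cons.1 h2 with h | h
      · split_ifs at h <;> simp [h]
      · simp [h]
    · intro y hy
      have hm0x : m ≤ (if x < m0 then x else m0) := h3 _ (List.mem_cons_self ..)
      rcases List.mem_cons.1 hy with rfl | hy
      · split_ifs at hm0x with hlt
        · exact le_trans hm0x (le_of_lt hlt)
        · exact hm0x
      rcases List.mem_cons.1 hy with rfl | hy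
      · split_ifs at hm0x with hlt
        · exact hm0x
        · exact le_trans hm0x (not_lt.1 hlt)
      · exact h3 _ (by simp [hy])

lemma runMin_none_cons (x : String) (t : List String) :
    ∃ m, runMin none (x :: t) = some m ∧ m ∈ x :: t ∧ ∀ y ∈ x :: t, m ≤ y := by
  obtain ⟨m, h1, h2, h3⟩ := runMin_some t x
  exact ⟨m, h1, h2, h3⟩

-- filtering a sorted list = sorting the filtered list
lemma filter_sorted (xs : List String) (r : String → Bool) :
    (PySem.List.sorted xs (fun x => x) false).filter r
      = PySem.List.sorted (xs.filter r) (fun x => x) false := by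
  symm
  exact PySem.List.sorted_id_eq_of_perm_of_pairwise _ _
    ((PySem.List.sorted_perm xs (fun x => x) false).filter r)
    ((PySem.List.sorted_pairwise xs (fun x => x)).filter r)

theorem choose_duplicate_keep_py_eq (files : List String) (hne : files ≠ []) :
    choose_duplicate_keep_py files = choose_duplicate_keep_py_alt files := by
  unfold choose_duplicate_keep_py choose_duplicate_keep_py_alt
  rw [fold_eq]
  obtain ⟨m0, t0, hL⟩ : ∃ m0 t0, PySem.List.sorted files (fun x => x) false = m0 :: t0 := by
    cases h : PySem.List.sorted files (fun x => x) false with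
    | nil => exact absurd ((PySem.List.sorted_eq_nil_iff files _ false).1 h) hne
    | cons a b => exact ⟨a, b, rfl⟩
  have hm0 : m0 ∈ files := (PySem.List.mem_sorted files _ false m0).1 (hL ▸ List.mem_cons_self ..)
  have hm0le : ∀ y ∈ files, m0 ≤ y := PySem.List.key_head_sorted_le files _ hL
  obtain ⟨k, hk⟩ : ∃ k, PySem.List.min? files (fun x => x) = some k := by
    cases h : PySem.List.min? files (fun x => x) with
    | none => exact absurd ((PySem.List.min?_eq_none_iff files _).1 h) hne
    | some k => exact ⟨k, rfl⟩
  have hkmem := PySem.List.min?_mem hk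
  have hkle := PySem.List.min?_isMin (key := fun x => x) hk
  have hm0k : m0 = k := le_antisymm (hm0le k hkmem) (hkle m0 hm0)
  simp only [filter_sorted]
  have hnil : PySem.List.sorted ([] : List String) (fun x => x) false = [] := rfl
  cases hfp : List.filter (fun f => split_from_relpath f == "test") files with
  | nil =>
    simp [hnil, runMin, hk, hL, PySem.List.pyGet?, PySem.List.pyIdx?, hm0k]
  | cons x xs =>
    obtain ⟨m, hrm, hmem, hmle⟩ := runMin_none_cons x xs
    obtain ⟨a0, as, hS⟩ : ∃ a0 as,
        PySem.List.sorted (x :: xs) (fun x => x) false = a0 :: as := by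
      cases h : PySem.List.sorted (x :: xs) (fun x => x) false with
      | nil =>
        rw [PySem.List.sorted_eq_nil_iff] at h
        exact absurd h (by simp)
      | cons a b => exact ⟨a, b, rfl⟩
    have ha0mem : a0 ∈ x :: xs :=
      (PySem.List.mem_sorted _ _ false a0).1 (hS ▸ List.mem_cons_self ..)
    have ha0le : ∀ y ∈ x :: xs, a0 ≤ y := PySem.List.key_head_sorted_le _ _ hS
    have ham : a0 = m := le_antisymm (ha0le m hmem) (hmle a0 ha0mem)
    cases hfq : List.filter (fun f => split_from_relpath f == "train") files with
    | nil =>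
      simp [hnil, hrm, hk, hL, hS, PySem.List.pyGet?, PySem.List.pyIdx?, hm0k]
    | cons y ys =>
      obtain ⟨b0, bs, hSq⟩ : ∃ b0 bs,
          PySem.List.sorted (y :: ys) (fun x => x) false = b0 :: bs := by
        cases h : PySem.List.sorted (y :: ys) (fun x => x) false with
        | nil =>
          rw [PySem.List.sorted_eq_nil_iff] at h
          exact absurd h (by simp)
        | cons a b => exact ⟨a, b, rfl⟩
      simp [hrm, hS, hSq, ham, PySem.List.pyGet?, PySem.List.pyIdx?]

-- ===== VERDICT (by name: the statement is the Claim_ definition above) =====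
theorem choose_duplicate_keep_py_spec : Claim_equal_choose_duplicate_keep_py := by
  intro files _ hne
  unfold Spec_choose_duplicate_keep_py
  exact choose_duplicate_keep_py_eq files hne
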